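-- pv_equiv track=rewrite | github.com/jamescalnan/BIO-olympiad | bio_2021_q1.py | is_pat
-- ===== SOURCE A (Python) =====
-- def is_pat(s):
--     if len(s) == 1:
--         return True
--
--     for i in range(1, len(s)):
--         left = s[:i]
--         right = s[i:]
--
--         # Check if all letters in left are later in alphabet than all in right
--         if all(l > r for l in left for r in right):
--             # Check if reverse of left and right are pats
--             if is_pat(left[::-1]) and is_pat(right[::-1]):
--                 return True
--
--     return False
-- ===== SOURCE B (Python) =====
-- def is_pat(s):
--     # prefix-min / suffix-max arrays replace A's all-pairs split check
--     n = len(s)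
--     if n == 0:
--         return False
--     if n == 1:
--         return True
--     suffix_max = list(s)
--     for i in range(n - 2, -1, -1):
--         if suffix_max[i + 1] > suffix_max[i]:
--             suffix_max[i] = suffix_max[i + 1]
--     prefix_min = list(s)
--     for i in range(1, n):
--         if prefix_min[i - 1] < prefix_min[i]:
--             prefix_min[i] = prefix_min[i - 1]
--     return any(prefix_min[i - 1] > suffix_max[i]
--                and is_pat(s[:i][::-1]) and is_pat(s[i:][::-1])
--                for i in range(1, n))
-- ===== Notes on version B (the rewrite author's own statement) =====
-- stated objective: faster
-- what changed: The O(k*(n-k)) all-pairs comparison at every split point is replaced by prefix-min and suffix-max arrays computed once per call, so each split is checked with one comparison.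
import Mathlib
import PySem

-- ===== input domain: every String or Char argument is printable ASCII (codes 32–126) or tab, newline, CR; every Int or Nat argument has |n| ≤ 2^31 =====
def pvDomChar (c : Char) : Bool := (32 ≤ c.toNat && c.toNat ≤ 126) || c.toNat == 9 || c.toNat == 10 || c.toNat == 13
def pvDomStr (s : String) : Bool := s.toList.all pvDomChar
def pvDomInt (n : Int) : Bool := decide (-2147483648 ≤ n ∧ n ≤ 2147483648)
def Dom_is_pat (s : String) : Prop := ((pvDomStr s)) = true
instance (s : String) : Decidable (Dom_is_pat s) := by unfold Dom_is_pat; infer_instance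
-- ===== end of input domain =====

-- B replaces A's all-pairs split check by prefix-min/suffix-max arrays (objective: faster, O(n) per call instead of O(n^3)).

-- ===== PORT A =====
-- works on the char list; the slices s[:i], s[i:] with 1 ≤ i < len(s) are exactly take/drop
def is_pat_core (l : List Char) : Bool :=
  if l.length = 1 then true
  else
    (PySem.List.pyRange 1 l.length 1).attach.any (fun ⟨i, hi⟩ =>
      let left := l.take i.toNat
      let right := l.drop i.toNat
      (left.all (fun a => right.all (fun b => decide (b < a)))) &&
        is_pat_core left.reverse && is_pat_core right.reverse)
termination_by l.length
decreasing_by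
  · have h := (PySem.List.mem_pyRange_one).1 hi
    simp only [List.length_reverse, List.length_take]
    omega
  · have h := (PySem.List.mem_pyRange_one).1 hi
    simp only [List.length_reverse, List.length_drop]
    omega

def is_pat (s : String) : Bool := is_pat_core s.toList

-- ===== PORT B =====
-- Source B's right-to-left suffix-max pass (suffix_max[i] = max(suffix_max[i], suffix_max[i+1])) as the obvious structural recursion
def suffMax : List Char → List Char
  | [] => []
  | c :: rest =>
    match suffMax rest with
    | [] => [c]
    | m :: ms => (if m > c then m else c) :: m :: ms

-- Source B's left-to-right prefix-min pass (prefix_min[i] = min(prefix_min[i], prefix_min[i-1]))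
def prefMin : Char → List Char → List Char
  | _, [] => []
  | m, c :: rest =>
    let m' := if m < c then m else c
    m' :: prefMin m' rest

def is_pat_alt_core (l : List Char) : Bool :=
  match l with
  | [] => false
  | [_] => true
  | c :: d :: rest =>
    let sm := suffMax (c :: d :: rest)
    let pm := c :: prefMin c (d :: rest)
    (PySem.List.pyRange 1 (c :: d :: rest).length 1).attach.any (fun ⟨i, hi⟩ =>
      decide (PySem.List.pyGetD pm (i - 1) ' ' > PySem.List.pyGetD sm i ' ') &&
        is_pat_alt_core ((c :: d :: rest).take i.toNat).reverse &&
        is_pat_alt_core ((c :: d :: rest).drop i.toNat).reverse)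
termination_by l.length
decreasing_by
  · have h := (PySem.List.mem_pyRange_one).1 hi
    simp only [List.length_cons] at h
    simp only [List.length_reverse, List.length_take, List.length_cons]
    exact lt_of_le_of_lt (Nat.min_le_left _ _) (by omega)
  · have h := (PySem.List.mem_pyRange_one).1 hi
    simp only [List.length_cons] at h
    simp only [List.length_reverse, List.length_drop, List.length_cons]
    omega

def is_pat_alt (s : String) : Bool := is_pat_alt_core s.toList

-- ===== PRECONDITION & SPEC =====
def Spec_is_pat (s : String) (out : Bool) : Prop := out = is_pat_alt s
instance (s : String) (out : Bool) : Decidable (Spec_is_pat s out) := by unfold Spec_is_pat; infer_instance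

-- ===== CLAIM (what is proved, stated in full; the proofs are below) =====
def Claim_equal_is_pat : Prop := ∀ (s : String), Dom_is_pat s → Spec_is_pat s (is_pat s)

-- ===== LEMMAS AND PROOFS =====

theorem if_lt_eq_min (m c : Char) : (if m < c then m else c) = min m c := by
  rcases lt_trichotomy m c with h | h | h
  · rw [if_pos h, min_def, if_pos h.le]
  · subst h; simp
  · rw [if_neg (lt_asymm h), min_def, if_neg (not_le.2 h)]

theorem if_gt_eq_max (c m : Char) : (if m > c then m else c) = max c m := by
  rcases lt_trichotomy c m with h | h | h
  · rw [if_pos h, max_def, if_pos h.le]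
  · subst h; simp
  · rw [if_neg (lt_asymm h), max_def, if_neg (not_le.2 h)]

theorem prefMin_length (tl : List Char) (m : Char) : (prefMin m tl).length = tl.length := by
  induction tl generalizing m with
  | nil => rfl
  | cons c rest ih => simp [prefMin, ih]

theorem suffMax_length (l : List Char) : (suffMax l).length = l.length := by
  induction l with
  | nil => rfl
  | cons c rest ih =>
    rw [suffMax]
    rcases h : suffMax rest with _ | ⟨m, ms⟩ <;> simp_all

theorem prefMin_getD (tl : List Char) (m : Char) (j : Nat) (d : Char)
    (hj : j < tl.length) : (prefMin m tl).getD j d = (tl.take (j+1)).foldl min m := by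
  induction tl generalizing m j with
  | nil => simp at hj
  | cons c rest ih =>
    rw [prefMin]
    cases j with
    | zero => simp [if_lt_eq_min]
    | succ j =>
      simp only [List.getD_cons_succ, List.take_succ_cons, List.foldl_cons]
      rw [ih _ j (by simpa using hj), if_lt_eq_min]

theorem fullPref_getD (c : Char) (tl : List Char) (j : Nat) (d : Char)
    (hj : j < tl.length + 1) :
    ((c :: prefMin c tl).getD j d) = (tl.take j).foldl min c := by
  cases j with
  | zero => simp
  | succ j =>
    simp only [List.getD_cons_succ]
    rw [prefMin_getD tl c j d (by omega)]

theorem suffMax_getD (l : List Char) : ∀ (j : Nat) (d x : Char) (xs : List Char),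
    l.drop j = x :: xs → (suffMax l).getD j d = xs.foldl max x := by
  induction l with
  | nil => intro j d x xs h; simp at h
  | cons c rest ih =>
    intro j d x xs h
    cases j with
    | zero =>
      simp only [List.drop_zero] at h
      injection h with h1 h2
      subst h1; subst h2
      rcases rest with _ | ⟨y, ys⟩
      · simp [suffMax]
      · have hm := ih 0 d y ys (by simp)
        rcases hr : suffMax (y :: ys) with _ | ⟨m, ms⟩
        · exact absurd (congrArg List.length hr) (by simp [suffMax_length])
        · rw [hr] at hm
          simp only [List.getD_cons_zero] at hm
          rw [suffMax, hr]
          simp only [List.getD_cons_zero, if_gt_eq_max, hm, List.foldl_cons]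
          exact (List.foldl_assoc (l := ys) (a₁ := c) (a₂ := y)).symm
    | succ j =>
      have h' : rest.drop j = x :: xs := by simpa using h
      rcases hr : suffMax rest with _ | ⟨m, ms⟩
      · exfalso
        have : rest.length = 0 := by rw [← suffMax_length, hr]; rfl
        rw [List.eq_nil_of_length_eq_zero this] at h'; simp at h'
      · rw [suffMax, hr]
        simp only [List.getD_cons_succ]
        rw [← hr, ih j d x xs h']

theorem lt_foldl_min (xs : List Char) (x b : Char) :
    b < xs.foldl min x ↔ b < x ∧ ∀ a ∈ xs, b < a := by
  induction xs generalizing x with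
  | nil => simp
  | cons c rest ih =>
    simp only [List.foldl_cons, ih, lt_min_iff, List.mem_cons]
    constructor
    · rintro ⟨⟨h1, h2⟩, h3⟩
      exact ⟨h1, fun a ha => ha.elim (fun e => e ▸ h2) (h3 a)⟩
    · rintro ⟨h1, h2⟩
      exact ⟨⟨h1, h2 c (Or.inl rfl)⟩, fun a ha => h2 a (Or.inr ha)⟩

theorem foldl_max_lt (xs : List Char) (x a : Char) :
    xs.foldl max x < a ↔ x < a ∧ ∀ b ∈ xs, b < a := by
  induction xs generalizing x with
  | nil => simp
  | cons c rest ih =>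
    simp only [List.foldl_cons, ih, max_lt_iff, List.mem_cons]
    constructor
    · rintro ⟨⟨h1, h2⟩, h3⟩
      exact ⟨h1, fun b hb => hb.elim (fun e => e ▸ h2) (h3 b)⟩
    · rintro ⟨h1, h2⟩
      exact ⟨⟨h1, h2 c (Or.inl rfl)⟩, fun b hb => h2 b (Or.inr hb)⟩

theorem pairs_eq_minmax (x : Char) (xs : List Char) (y : Char) (ys : List Char) :
    ((x :: xs).all (fun a => (y :: ys).all (fun b => decide (b < a)))) =
      decide (ys.foldl max y < xs.foldl min x) := by
  apply Bool.eq_iff_iff.2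
  simp only [List.all_eq_true, decide_eq_true_iff, List.forall_mem_cons,
    foldl_max_lt, lt_foldl_min]

theorem core_nil : is_pat_core [] = false := by
  rw [is_pat_core]
  norm_num [PySem.List.pyRange_one_eq_nil]

theorem alt_nil : is_pat_alt_core [] = false := by
  simp [is_pat_alt_core]

theorem core_eq : ∀ (n : Nat) (l : List Char), l.length ≤ n →
    is_pat_core l = is_pat_alt_core l := by
  intro n
  induction n with
  | zero =>
    intro l h
    have : l = [] := List.eq_nil_of_length_eq_zero (by omega)
    subst this
    rw [core_nil, alt_nil]
  | succ n ih =>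
    intro l hlen
    match l with
    | [] => rw [core_nil, alt_nil]
    | [c] =>
      rw [is_pat_core]
      simp [is_pat_alt_core]
    | c :: d :: rest =>
      rw [is_pat_core, is_pat_alt_core]
      rw [if_neg (by simp)]
      apply PySem.List.any_congr_mem
      rintro ⟨i, hi⟩ -
      have hb := (PySem.List.mem_pyRange_one).1 hi
      simp only [List.length_cons] at hb hlen
      dsimp only
      have hknat : 1 ≤ i.toNat ∧ i.toNat < rest.length + 2 := by omega
      obtain ⟨x, xs, hdrop⟩ : ∃ x xs, (c :: d :: rest).drop i.toNat = x :: xs := by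
        rcases h : (c :: d :: rest).drop i.toNat with _ | ⟨x, xs⟩
        · exfalso
          have := congrArg List.length h
          simp only [List.length_drop, List.length_cons, List.length_nil] at this
          omega
        · exact ⟨x, xs, rfl⟩
      have htake : (c :: d :: rest).take i.toNat = c :: (d :: rest).take (i.toNat - 1) := by
        obtain ⟨k, hk0⟩ := Nat.exists_eq_add_of_le hknat.1
        have hk : i.toNat = k + 1 := by omega
        rw [hk]; simp
      have e1 : (((c :: d :: rest).take i.toNat).all
            (fun a => ((c :: d :: rest).drop i.toNat).all (fun b => decide (b < a)))) =
          decide (PySem.List.pyGetD (c :: prefMin c (d :: rest)) (i - 1) ' ' >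
            PySem.List.pyGetD (suffMax (c :: d :: rest)) i ' ') := by
        rw [htake, hdrop, pairs_eq_minmax]
        have hpmlen : (c :: prefMin c (d :: rest)).length = rest.length + 2 := by
          simp [prefMin_length]
        have hsmlen : (suffMax (c :: d :: rest)).length = rest.length + 2 := by
          rw [suffMax_length]; rfl
        rw [PySem.List.pyGetD_eq_getElem _ _ (by omega)
              (by rw [hpmlen]; push_cast; omega),
            PySem.List.pyGetD_eq_getElem _ _ (by omega)
              (by rw [hsmlen]; push_cast; omega)]
        rw [← List.getD_eq_getElem _ ' ' (by rw [hpmlen]; omega),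
            ← List.getD_eq_getElem _ ' ' (by rw [hsmlen]; omega)]
        rw [fullPref_getD c (d :: rest) (i-1).toNat ' '
              (by simp only [List.length_cons]; omega)]
        rw [suffMax_getD (c :: d :: rest) i.toNat ' ' x xs hdrop]
        have hti : (i - 1).toNat = i.toNat - 1 := by omega
        rw [hti]
      have e2 : is_pat_core ((c :: d :: rest).take i.toNat).reverse =
          is_pat_alt_core ((c :: d :: rest).take i.toNat).reverse := by
        apply ih
        simp only [List.length_reverse, List.length_take, List.length_cons]
        omega
      have e3 : is_pat_core ((c :: d :: rest).drop i.toNat).reverse =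
          is_pat_alt_core ((c :: d :: rest).drop i.toNat).reverse := by
        apply ih
        simp only [List.length_reverse, List.length_drop, List.length_cons]
        omega
      rw [e1, e2, e3]

-- ===== VERDICT (by name: the statement is the Claim_ definition above) =====
theorem is_pat_spec : Claim_equal_is_pat := by
  intro s _
  unfold Spec_is_pat is_pat is_pat_alt
  exact core_eq s.toList.length s.toList le_rfl
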